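-- pv_equiv track=rewrite | github.com/pypest/pypestvis | src/pypestvis/utils.py | _check_gridmappable
-- ===== SOURCE A (Python) =====
-- def _check_gridmappable(coords, min_size=20):
--     """Return True if any cluster of adjacent (i, j) has at least min_size members."""
--     from collections import deque
--
--     coords_set = set(map(tuple, coords))
--     visited = set()
--     max_cluster = 0
--
--     for cell in coords_set:
--         if cell in visited:
--             continue
--         # BFS for this cluster
--         queue = deque([cell])
--         cluster = set([cell])
--         while queue:
--             ci, cj = queue.popleft()
--             for di, dj in [(-1, 0), (1, 0), (0, -1), (0, 1),
--                            (-1, -1), (-1, 1), (1, -1), (1, 1)]: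
--                 neighbor = (ci + di, cj + dj)
--                 if neighbor in coords_set and neighbor not in cluster:
--                     cluster.add(neighbor)
--                     queue.append(neighbor)
--         visited |= cluster
--         max_cluster = max(max_cluster, len(cluster))
--         if max_cluster >= min_size:
--             return True
--     return False
-- ===== SOURCE B (Python) =====
-- _OFFS = ((-1, 0), (1, 0), (0, -1), (0, 1), (-1, -1), (-1, 1), (1, -1), (1, 1))
--
--
-- def _check_gridmappable(coords, min_size=20):
--     """Return True if any cluster of adjacent (i, j) has at least min_size members.
--
--     Grows each unvisited cell's 8-connected component by repeatedly dilating a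
--     frontier set against the whole cell set until it stops growing (pure set
--     algebra: no queue, no per-cell BFS)."""
--     cells = set(map(tuple, coords))
--     done = set()
--     for seed in cells:
--         if seed in done:
--             continue
--         comp, frontier = {seed}, {seed}
--         while frontier:
--             frontier = {n for n in cells
--                         if n not in comp
--                         and any((n[0] - m[0], n[1] - m[1]) in _OFFS for m in frontier)}
--             comp |= frontier
--         if len(comp) >= min_size:
--             return True
--         done |= comp
--     return False
-- ===== Notes on version B (the rewrite author's own statement) =====
-- stated objective: alternative
-- what changed: Replaces the deque-based BFS (pop a cell, probe its 8 neighbours, push fresh ones) by whole-set frontier dilation: each component is grown by filtering the cell set against the current frontier until a fixpoint, with no queue and no per-cell neighbour walk.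
import Mathlib
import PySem

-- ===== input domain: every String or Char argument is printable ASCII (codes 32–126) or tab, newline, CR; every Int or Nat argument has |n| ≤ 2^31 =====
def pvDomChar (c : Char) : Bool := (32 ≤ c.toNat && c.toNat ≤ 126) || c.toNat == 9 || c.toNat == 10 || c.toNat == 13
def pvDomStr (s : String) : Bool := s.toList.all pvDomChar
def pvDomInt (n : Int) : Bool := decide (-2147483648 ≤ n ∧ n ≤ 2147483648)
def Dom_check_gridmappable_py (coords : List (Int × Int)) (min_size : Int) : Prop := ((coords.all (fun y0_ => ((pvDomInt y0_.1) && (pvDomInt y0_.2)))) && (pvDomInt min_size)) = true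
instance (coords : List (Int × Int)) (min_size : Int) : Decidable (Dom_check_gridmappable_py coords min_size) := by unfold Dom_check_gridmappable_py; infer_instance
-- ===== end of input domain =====

-- B replaces A's per-cell deque BFS by component peeling via whole-set frontier dilation
-- (alternative decomposition, not claimed faster); return values agree on every input.

-- the 8 neighbour offsets, shared verbatim by both Pythons
def pvOFFS : List (Int × Int) := [(-1, 0), (1, 0), (0, -1), (0, 1), (-1, -1), (-1, 1), (1, -1), (1, 1)]

-- ===== PORT A =====
-- the inner `for di, dj in [...]` loop of A's BFS: scans the 8 offsets of (ci, cj),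
-- appending fresh in-grid neighbours to the queue and the cluster
def pvA_scan (cs : List (Int × Int)) (ci cj : Int) :
    List (Int × Int) → List (Int × Int) → List (Int × Int) → List (Int × Int) × List (Int × Int)
  | [], q, cl => (q, cl)
  | d :: offs, q, cl =>
      let nb : Int × Int := (ci + d.1, cj + d.2)
      if nb ∈ cs ∧ nb ∉ cl then pvA_scan cs ci cj offs (q ++ [nb]) (PySem.Set.add cl nb)
      else pvA_scan cs ci cj offs q cl

-- facts about one scan needed for pvA_bfs's termination (cited by `decreasing_by`)
theorem pvA_scan_cl_mono (cs : List (Int × Int)) (ci cj : Int)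
    (offs q cl : List (Int × Int)) : ∀ x ∈ cl, x ∈ (pvA_scan cs ci cj offs q cl).2 := by
  induction offs generalizing q cl with
  | nil => simp [pvA_scan]
  | cons d offs ih =>
    intro x hx
    simp only [pvA_scan]
    split_ifs with h
    · exact ih _ _ x (by simp [PySem.Set.mem_add, hx])
    · exact ih _ _ x hx

theorem pvA_scan_cases (cs : List (Int × Int)) (ci cj : Int)
    (offs q cl : List (Int × Int)) :
    ((pvA_scan cs ci cj offs q cl).2 = cl ∧ (pvA_scan cs ci cj offs q cl).1 = q) ∨
    (∃ x, x ∈ (pvA_scan cs ci cj offs q cl).2 ∧ x ∉ cl ∧ x ∈ cs) := by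
  induction offs generalizing q cl with
  | nil => left; simp [pvA_scan]
  | cons d offs ih =>
    simp only [pvA_scan]
    split_ifs with h
    · right
      refine ⟨(ci + d.1, cj + d.2), ?_, h.2, h.1⟩
      exact pvA_scan_cl_mono cs ci cj offs _ _ _ (by simp [PySem.Set.mem_add])
    · exact ih q cl

-- termination measure fact for pvA_bfs (cited by its `decreasing_by`)
theorem pvA_bfs_dec (cs : List (Int × Int)) (c : Int × Int) (qs cl : List (Int × Int)) :
    Prod.Lex (· < ·) (· < ·)
      ((cs.toFinset \ (pvA_scan cs c.1 c.2 pvOFFS qs cl).2.toFinset).card,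
       (pvA_scan cs c.1 c.2 pvOFFS qs cl).1.length)
      ((cs.toFinset \ cl.toFinset).card, (c :: qs).length) := by
  rcases pvA_scan_cases cs c.1 c.2 pvOFFS qs cl with ⟨h2, h1⟩ | ⟨x, hx2, hxcl, hxcs⟩
  · rw [h1, h2]
    exact Prod.Lex.right _ (by simp)
  · apply Prod.Lex.left
    apply Finset.card_lt_card
    constructor
    · intro y hy
      simp only [Finset.mem_sdiff, List.mem_toFinset] at *
      exact ⟨hy.1, fun hc => hy.2 (pvA_scan_cl_mono cs c.1 c.2 pvOFFS qs cl y hc)⟩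
    · intro hsub
      have hx : x ∈ cs.toFinset \ cl.toFinset := by
        simp only [Finset.mem_sdiff, List.mem_toFinset]; exact ⟨hxcs, hxcl⟩
      have := hsub hx
      simp only [Finset.mem_sdiff, List.mem_toFinset] at this
      exact this.2 hx2

-- A's BFS while-loop: pop the queue head, scan its 8 neighbours, repeat
def pvA_bfs (cs : List (Int × Int)) (q cl : List (Int × Int)) : List (Int × Int) :=
  match q with
  | [] => cl
  | c :: qs =>
    let r := pvA_scan cs c.1 c.2 pvOFFS qs cl
    pvA_bfs cs r.1 r.2
termination_by ((cs.toFinset \ cl.toFinset).card, q.length)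
decreasing_by exact pvA_bfs_dec cs c qs cl

-- A's outer `for cell in coords_set` loop, carrying visited and max_cluster
def pvA_outer (cs : List (Int × Int)) (min_size : Int) :
    List (Int × Int) → List (Int × Int) → Int → Bool
  | [], _, _ => false
  | cell :: rest, visited, maxc =>
    if cell ∈ visited then pvA_outer cs min_size rest visited maxc
    else
      let cluster := pvA_bfs cs [cell] [cell]
      let visited' := PySem.Set.union visited cluster
      let maxc' := max maxc (cluster.length : Int)
      if min_size ≤ maxc' then true
      else pvA_outer cs min_size rest visited' maxc'

def check_gridmappable_py (coords : List (Int × Int)) (min_size : Int) : Bool :=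
  let coords_set := PySem.Set.ofList coords
  pvA_outer coords_set min_size coords_set [] 0

-- ===== PORT B =====
-- one dilation round of Source B: the cells not yet in comp that touch the frontier
def pvB_grow (cs comp frontier : List (Int × Int)) : List (Int × Int) :=
  cs.filter (fun n =>
    decide (n ∉ comp) && frontier.any (fun m => decide ((n.1 - m.1, n.2 - m.2) ∈ pvOFFS)))

-- Source B's inner `while frontier` loop: saturate comp by frontier dilation
theorem pvB_grow_spec (cs comp frontier : List (Int × Int)) :
    ∀ x ∈ pvB_grow cs comp frontier, x ∈ cs ∧ x ∉ comp := by
  intro x hx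
  simp only [pvB_grow, List.mem_filter, Bool.and_eq_true, decide_eq_true_eq] at hx
  exact ⟨hx.1, hx.2.1⟩

theorem pvB_sat_dec (cs comp frontier : List (Int × Int)) (hfr : ¬ frontier = []) :
    (cs.toFinset \ (PySem.Set.union comp (pvB_grow cs comp frontier)).toFinset).card +
      (if pvB_grow cs comp frontier = [] then 0 else 1) <
    (cs.toFinset \ comp.toFinset).card + (if frontier = [] then 0 else 1) := by
  have hsub : cs.toFinset \ (PySem.Set.union comp (pvB_grow cs comp frontier)).toFinset ⊆
      cs.toFinset \ comp.toFinset := by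
    intro y hy
    simp only [Finset.mem_sdiff, List.mem_toFinset] at hy ⊢
    exact ⟨hy.1, fun hc => hy.2 ((PySem.Set.mem_union _ _ _).mpr (Or.inl hc))⟩
  rw [if_neg hfr]
  by_cases hf : pvB_grow cs comp frontier = []
  · rw [if_pos hf, Nat.add_zero]
    exact Nat.lt_add_one_of_le (Finset.card_le_card hsub)
  · rw [if_neg hf]
    refine Nat.add_lt_add_right ?_ 1
    apply Finset.card_lt_card
    refine ⟨hsub, fun hsup => ?_⟩
    rcases List.exists_mem_of_ne_nil _ hf with ⟨x, hx⟩
    obtain ⟨hxcs, hxnc⟩ := pvB_grow_spec cs comp frontier x hx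
    have hxm : x ∈ cs.toFinset \ comp.toFinset := by
      simp only [Finset.mem_sdiff, List.mem_toFinset]; exact ⟨hxcs, hxnc⟩
    have := hsup hxm
    simp only [Finset.mem_sdiff, List.mem_toFinset] at this
    exact this.2 ((PySem.Set.mem_union _ _ _).mpr (Or.inr hx))

def pvB_sat (cs comp frontier : List (Int × Int)) : List (Int × Int) :=
  if frontier = [] then comp
  else
    let f' := pvB_grow cs comp frontier
    pvB_sat cs (PySem.Set.union comp f') f'
termination_by (cs.toFinset \ comp.toFinset).card + (if frontier = [] then 0 else 1)
decreasing_by exact pvB_sat_dec cs comp frontier ‹_›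

-- Source B's outer `for seed in cells` loop, skipping cells already in done
def pvB_outer (cs : List (Int × Int)) (min_size : Int) :
    List (Int × Int) → List (Int × Int) → Bool
  | [], _ => false
  | seed :: rest, done =>
    if seed ∈ done then pvB_outer cs min_size rest done
    else
      let comp := pvB_sat cs [seed] [seed]
      if min_size ≤ (comp.length : Int) then true
      else pvB_outer cs min_size rest (PySem.Set.union done comp)

def check_gridmappable_py_alt (coords : List (Int × Int)) (min_size : Int) : Bool :=
  let cells := PySem.Set.ofList coords
  pvB_outer cells min_size cells []

-- ===== PRECONDITION & SPEC =====
def Spec_check_gridmappable_py (coords : List (Int × Int)) (min_size : Int) (out : Bool) : Prop := out = check_gridmappable_py_alt coords min_size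
instance (coords : List (Int × Int)) (min_size : Int) (out : Bool) : Decidable (Spec_check_gridmappable_py coords min_size out) := by unfold Spec_check_gridmappable_py; infer_instance

-- ===== CLAIM (what is proved, stated in full; the proofs are below) =====
def Claim_equal_check_gridmappable_py : Prop := ∀ (coords : List (Int × Int)) (min_size : Int), Dom_check_gridmappable_py coords min_size → Spec_check_gridmappable_py coords min_size (check_gridmappable_py coords min_size)

-- ===== LEMMAS AND PROOFS =====

-- 8-neighbour adjacency and reachability through the cell set (proof-layer notions)
def pvAdj (a b : Int × Int) : Prop := (b.1 - a.1, b.2 - a.2) ∈ pvOFFS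

def pvReach (cs : List (Int × Int)) (c x : Int × Int) : Prop :=
  Relation.ReflTransGen (fun a b => b ∈ cs ∧ pvAdj a b) c x

theorem pvReach_subset_closed {cs S : List (Int × Int)} {c : Int × Int}
    (hc : c ∈ S) (hcl : ∀ x ∈ S, ∀ y, y ∈ cs → pvAdj x y → y ∈ S) :
    ∀ x, pvReach cs c x → x ∈ S := by
  intro x h
  induction h with
  | refl => exact hc
  | tail _ hstep ih => exact hcl _ ih _ hstep.1 hstep.2

-- ---- facts about A's neighbour scan ----

theorem pvA_scan_q_mono (cs : List (Int × Int)) (ci cj : Int)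
    (offs q cl : List (Int × Int)) : ∀ x ∈ q, x ∈ (pvA_scan cs ci cj offs q cl).1 := by
  induction offs generalizing q cl with
  | nil => simp [pvA_scan]
  | cons d offs ih =>
    intro x hx
    simp only [pvA_scan]
    split_ifs with h
    · exact ih _ _ x (by simp [hx])
    · exact ih _ _ x hx

theorem pvA_scan_cl_sub (cs : List (Int × Int)) (ci cj : Int)
    (offs q cl : List (Int × Int)) :
    ∀ x ∈ (pvA_scan cs ci cj offs q cl).2,
      x ∈ cl ∨ (x ∈ cs ∧ ∃ d ∈ offs, x = (ci + d.1, cj + d.2)) := by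
  induction offs generalizing q cl with
  | nil => simp [pvA_scan]
  | cons d offs ih =>
    intro x hx
    simp only [pvA_scan] at hx
    split_ifs at hx with h
    · rcases ih _ _ x hx with hcl | ⟨hcs, d', hd', he⟩
      · rcases (PySem.Set.mem_add _ _ _).mp hcl with hcl | he
        · exact Or.inl hcl
        · exact Or.inr ⟨he ▸ h.1, d, List.mem_cons_self, he⟩
      · exact Or.inr ⟨hcs, d', List.mem_cons_of_mem _ hd', he⟩
    · rcases ih _ _ x hx with hcl | ⟨hcs, d', hd', he⟩
      · exact Or.inl hcl
      · exact Or.inr ⟨hcs, d', List.mem_cons_of_mem _ hd', he⟩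

theorem pvA_scan_cl_cover (cs : List (Int × Int)) (ci cj : Int)
    (offs q cl : List (Int × Int)) :
    ∀ d ∈ offs, (ci + d.1, cj + d.2) ∈ cs →
      (ci + d.1, cj + d.2) ∈ (pvA_scan cs ci cj offs q cl).2 := by
  induction offs generalizing q cl with
  | nil => simp
  | cons d' offs ih =>
    intro d hd hcs
    rcases List.mem_cons.mp hd with he | hd
    · subst he
      simp only [pvA_scan]
      split_ifs with h
      · exact pvA_scan_cl_mono cs ci cj offs _ _ _ (by simp [PySem.Set.mem_add])
      · have hcl : (ci + d.1, cj + d.2) ∈ cl := by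
          by_contra hn
          exact h ⟨hcs, hn⟩
        exact pvA_scan_cl_mono cs ci cj offs _ _ _ hcl
    · simp only [pvA_scan]
      split_ifs with h
      · exact ih _ _ d hd hcs
      · exact ih _ _ d hd hcs

theorem pvA_scan_q_sub (cs : List (Int × Int)) (ci cj : Int)
    (offs q cl : List (Int × Int)) :
    ∀ x ∈ (pvA_scan cs ci cj offs q cl).1,
      x ∈ q ∨ (x ∈ (pvA_scan cs ci cj offs q cl).2 ∧ x ∉ cl) := by
  induction offs generalizing q cl with
  | nil => simp [pvA_scan]
  | cons d offs ih =>
    intro x hx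
    simp only [pvA_scan] at hx ⊢
    split_ifs at hx ⊢ with h
    · rcases ih _ _ x hx with hq | ⟨hin, hnotin⟩
      · rcases List.mem_append.mp hq with hq | he
        · exact Or.inl hq
        · have he : x = (ci + d.1, cj + d.2) := by simpa using he
          refine Or.inr ⟨?_, he ▸ h.2⟩
          exact pvA_scan_cl_mono cs ci cj offs _ _ _ (by simp [PySem.Set.mem_add, he])
      · refine Or.inr ⟨hin, fun hcl => hnotin ((PySem.Set.mem_add _ _ _).mpr (Or.inl hcl))⟩
    · exact ih _ _ x hx

theorem pvA_scan_new_in_q (cs : List (Int × Int)) (ci cj : Int)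
    (offs q cl : List (Int × Int)) :
    ∀ x ∈ (pvA_scan cs ci cj offs q cl).2, x ∉ cl → x ∈ (pvA_scan cs ci cj offs q cl).1 := by
  induction offs generalizing q cl with
  | nil => intro x hx hn; exact absurd hx hn
  | cons d offs ih =>
    intro x hx hn
    simp only [pvA_scan] at hx ⊢
    split_ifs at hx ⊢ with h
    · by_cases he : x = (ci + d.1, cj + d.2)
      · exact pvA_scan_q_mono cs ci cj offs _ _ x (by simp [he])
      · refine ih _ _ x hx ?_
        intro hadd
        rcases (PySem.Set.mem_add _ _ _).mp hadd with hcl | he'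
        · exact hn hcl
        · exact he he'
    · exact ih _ _ x hx hn

theorem pvA_scan_nodup (cs : List (Int × Int)) (ci cj : Int)
    (offs q cl : List (Int × Int)) (hnd : cl.Nodup) :
    (pvA_scan cs ci cj offs q cl).2.Nodup := by
  induction offs generalizing q cl with
  | nil => simpa [pvA_scan]
  | cons d offs ih =>
    simp only [pvA_scan]
    split_ifs with h
    · exact ih _ _ (PySem.Set.nodup_add _ _ hnd)
    · exact ih _ _ hnd

-- ---- A's BFS computes exactly the reachable set ----

theorem pvA_bfs_spec (cs : List (Int × Int)) (c : Int × Int) (q cl : List (Int × Int)) :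
    cl.Nodup → (∀ x ∈ q, x ∈ cl) → (∀ x ∈ cl, pvReach cs c x) →
    (∀ x ∈ cl, x ∉ q → ∀ y, y ∈ cs → pvAdj x y → y ∈ cl) → c ∈ cl →
    (pvA_bfs cs q cl).Nodup ∧ c ∈ pvA_bfs cs q cl ∧
    (∀ x ∈ pvA_bfs cs q cl, pvReach cs c x) ∧
    (∀ x ∈ pvA_bfs cs q cl, ∀ y, y ∈ cs → pvAdj x y → y ∈ pvA_bfs cs q cl) := by
  fun_induction pvA_bfs cs q cl with
  | case1 cl =>
    intro hnd _hq hr hclosed hcin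
    exact ⟨hnd, hcin, hr, fun x hx => hclosed x hx (by simp)⟩
  | case2 cl cell qs r ih =>
    intro hnd hq hr hclosed hcin
    apply ih
    · exact pvA_scan_nodup _ _ _ _ _ _ hnd
    · intro x hx
      rcases pvA_scan_q_sub _ _ _ _ _ _ x hx with hxq | ⟨hin, _⟩
      · exact pvA_scan_cl_mono _ _ _ _ _ _ x (hq x (List.mem_cons_of_mem _ hxq))
      · exact hin
    · intro x hx
      rcases pvA_scan_cl_sub _ _ _ _ _ _ x hx with hcl | ⟨hcs, d, hd, he⟩
      · exact hr x hcl
      · have hcell : pvReach cs c cell := hr cell (hq cell List.mem_cons_self)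
        refine Relation.ReflTransGen.tail hcell ⟨he ▸ hcs, ?_⟩
        subst he
        simp [pvAdj, hd]
    · intro x hx hnq y hy hadj
      by_cases hxcl : x ∈ cl
      · by_cases hxc : x = cell
        · subst hxc
          have hyd : (x.1 + (y.1 - x.1), x.2 + (y.2 - x.2)) = y := by
            simp
          have := pvA_scan_cl_cover cs x.1 x.2 pvOFFS qs cl (y.1 - x.1, y.2 - x.2)
            hadj (by rw [hyd]; exact hy)
          rwa [hyd] at this
        · have hxqs : x ∉ qs := fun hxqs => hnq (pvA_scan_q_mono _ _ _ _ _ _ x hxqs)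
          have hxq : x ∉ cell :: qs := by
            simp only [List.mem_cons, not_or]
            exact ⟨hxc, hxqs⟩
          exact pvA_scan_cl_mono _ _ _ _ _ _ y (hclosed x hxcl hxq y hy hadj)
      · exact absurd (pvA_scan_new_in_q _ _ _ _ _ _ x hx hxcl) hnq
    · exact pvA_scan_cl_mono _ _ _ _ _ _ c hcin

theorem pvA_bfs_char (cs : List (Int × Int)) (c : Int × Int) :
    (pvA_bfs cs [c] [c]).Nodup ∧ ∀ x, x ∈ pvA_bfs cs [c] [c] ↔ pvReach cs c x := by
  obtain ⟨h1, h2, h3, h4⟩ := pvA_bfs_spec cs c [c] [c] (by simp) (by simp)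
    (by intro x hx; simp only [List.mem_singleton] at hx; exact hx ▸ Relation.ReflTransGen.refl)
    (by intro x hx hnq; exact absurd hx hnq) (by simp)
  exact ⟨h1, fun x => ⟨h3 x, fun hr => pvReach_subset_closed h2 h4 x hr⟩⟩

-- ---- B's saturation computes exactly the reachable set ----

theorem pvB_grow_mem (cs comp frontier : List (Int × Int)) (x : Int × Int) :
    x ∈ pvB_grow cs comp frontier ↔ x ∈ cs ∧ x ∉ comp ∧ ∃ m ∈ frontier, pvAdj m x := by
  simp [pvB_grow, List.mem_filter, List.any_eq_true, pvAdj]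

theorem pvB_sat_spec (cs : List (Int × Int)) (c : Int × Int) (comp frontier : List (Int × Int)) :
    comp.Nodup → (∀ x ∈ frontier, x ∈ comp) → (∀ x ∈ comp, pvReach cs c x) → c ∈ comp →
    (∀ x ∈ comp, x ∉ frontier → ∀ y, y ∈ cs → pvAdj x y → y ∈ comp) →
    (pvB_sat cs comp frontier).Nodup ∧ c ∈ pvB_sat cs comp frontier ∧
    (∀ x ∈ pvB_sat cs comp frontier, pvReach cs c x) ∧
    (∀ x ∈ pvB_sat cs comp frontier, ∀ y, y ∈ cs → pvAdj x y → y ∈ pvB_sat cs comp frontier) := by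
  fun_induction pvB_sat cs comp frontier with
  | case1 comp =>
    intro hnd _hfc hr hcin hclosed
    exact ⟨hnd, hcin, hr, fun x hx => hclosed x hx (by simp)⟩
  | case2 comp frontier hfr f' ih =>
    intro hnd hfc hr hcin hclosed
    apply ih
    · exact PySem.Set.nodup_union _ _ hnd
    · intro x hx
      exact (PySem.Set.mem_union _ _ _).mpr (Or.inr hx)
    · intro x hx
      rcases (PySem.Set.mem_union _ _ _).mp hx with hxc | hxf
      · exact hr x hxc
      · obtain ⟨hxcs, _, m, hm, hadj⟩ := (pvB_grow_mem cs comp frontier x).mp hxf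
        exact Relation.ReflTransGen.tail (hr m (hfc m hm)) ⟨hxcs, hadj⟩
    · exact (PySem.Set.mem_union _ _ _).mpr (Or.inl hcin)
    · intro x hx hnf y hy hadj
      rcases (PySem.Set.mem_union _ _ _).mp hx with hxc | hxf
      · by_cases hxfr : x ∈ frontier
        · by_cases hyc : y ∈ comp
          · exact (PySem.Set.mem_union _ _ _).mpr (Or.inl hyc)
          · exact (PySem.Set.mem_union _ _ _).mpr
              (Or.inr ((pvB_grow_mem cs comp frontier y).mpr ⟨hy, hyc, x, hxfr, hadj⟩))
        · exact (PySem.Set.mem_union _ _ _).mpr (Or.inl (hclosed x hxc hxfr y hy hadj))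
      · exact absurd hxf hnf

theorem pvB_sat_char (cs : List (Int × Int)) (c : Int × Int) :
    (pvB_sat cs [c] [c]).Nodup ∧ ∀ x, x ∈ pvB_sat cs [c] [c] ↔ pvReach cs c x := by
  obtain ⟨h1, h2, h3, h4⟩ := pvB_sat_spec cs c [c] [c] (by simp) (by simp)
    (by intro x hx; simp only [List.mem_singleton] at hx; exact hx ▸ Relation.ReflTransGen.refl)
    (by simp)
    (by intro x hx hnf; exact absurd hx hnf)
  exact ⟨h1, fun x => ⟨h3 x, fun hr => pvReach_subset_closed h2 h4 x hr⟩⟩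

-- ---- the two per-seed components agree ----

theorem pv_comp_eq (cs : List (Int × Int)) (c : Int × Int) :
    (∀ x, x ∈ pvA_bfs cs [c] [c] ↔ x ∈ pvB_sat cs [c] [c]) ∧
    (pvA_bfs cs [c] [c]).length = (pvB_sat cs [c] [c]).length := by
  obtain ⟨hA, hAm⟩ := pvA_bfs_char cs c
  obtain ⟨hB, hBm⟩ := pvB_sat_char cs c
  have hmem : ∀ x, x ∈ pvA_bfs cs [c] [c] ↔ x ∈ pvB_sat cs [c] [c] :=
    fun x => (hAm x).trans (hBm x).symm
  exact ⟨hmem, ((List.perm_ext_iff_of_nodup hA hB).mpr hmem).length_eq⟩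

-- ---- the two outer loops agree ----

theorem pv_outer_eq (cs : List (Int × Int)) (ms : Int) :
    ∀ pending visited done maxc, (∀ x, x ∈ visited ↔ x ∈ done) → (maxc = 0 ∨ maxc < ms) →
    pvA_outer cs ms pending visited maxc = pvB_outer cs ms pending done := by
  intro pending
  induction pending with
  | nil => intro visited done maxc _ _; rfl
  | cons p rest ih =>
    intro visited done maxc hvd hmax
    by_cases hpv : p ∈ visited
    · simp only [pvA_outer, pvB_outer, if_pos hpv, if_pos ((hvd p).mp hpv)]
      exact ih visited done maxc hvd hmax
    · have hpd : p ∉ done := fun h => hpv ((hvd p).mpr h)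
      obtain ⟨hmem, hlen⟩ := pv_comp_eq cs p
      simp only [pvA_outer, pvB_outer, if_neg hpv, if_neg hpd]
      rw [← hlen]
      have hplen : 1 ≤ (pvA_bfs cs [p] [p]).length := by
        have : p ∈ pvA_bfs cs [p] [p] := (pvA_bfs_char cs p).2 p |>.mpr .refl
        exact List.length_pos_of_mem this
      have hnn : (0 : Int) ≤ ((pvA_bfs cs [p] [p]).length : Int) := Int.natCast_nonneg _
      have hcond : (ms ≤ max maxc ((pvA_bfs cs [p] [p]).length : Int)) ↔
          (ms ≤ ((pvA_bfs cs [p] [p]).length : Int)) := by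
        rcases hmax with h0 | hlt
        · subst h0
          constructor
          · intro h; omega
          · intro h; omega
        · constructor
          · intro h
            rcases le_max_iff.mp h with h' | h'
            · omega
            · exact h'
          · intro h; exact le_max_of_le_right h
      by_cases hms : ms ≤ ((pvA_bfs cs [p] [p]).length : Int)
      · rw [if_pos (hcond.mpr hms), if_pos hms]
      · rw [if_neg (fun h => hms (hcond.mp h)), if_neg hms]
        have hlt' : max maxc ((pvA_bfs cs [p] [p]).length : Int) < ms := by
          simp only [not_le] at hms
          simp only [max_lt_iff]
          rcases hmax with h0 | h
          · subst h0; omega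
          · exact ⟨h, hms⟩
        refine ih (PySem.Set.union visited (pvA_bfs cs [p] [p]))
          (PySem.Set.union done (pvB_sat cs [p] [p]))
          (max maxc ((pvA_bfs cs [p] [p]).length : Int)) ?_ (Or.inr hlt')
        intro x
        rw [PySem.Set.mem_union, PySem.Set.mem_union]
        exact or_congr (hvd x) (hmem x)

-- ===== VERDICT (by name: the statement is the Claim_ definition above) =====
theorem check_gridmappable_py_spec : Claim_equal_check_gridmappable_py := by
  unfold Claim_equal_check_gridmappable_py
  intro coords ms _dom
  unfold Spec_check_gridmappable_py check_gridmappable_py check_gridmappable_py_alt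
  exact pv_outer_eq (PySem.Set.ofList coords) ms (PySem.Set.ofList coords) [] [] 0
    (fun x => Iff.rfl) (Or.inl rfl)
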